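-- pv_equiv track=rewrite | github.com/hansumane/advent_of_code | 2016/07/main.py | part2
-- ===== SOURCE A (Python) =====
-- from operator import itemgetter
--
-- def part2(ips):
--     res = 0
--     for ip in ips:
--         valid, patterns = False, []
--         ip = sorted(ip, key=itemgetter(0))  # "" < "b"
--         for (b, syms) in ip:
--             for i in range(len(syms) - 2):
--                 t = syms[i:i + 3]
--                 if t[0] != t[1] and f"{t[0]}{t[1]}" == f"{t[2]}{t[1]}":
--                     if b == "":
--                         patterns.append(t)
--                     elif b == "b":
--                         tt = f"{t[1]}{t[0]}{t[1]}"
--                         if tt in patterns: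
--                             valid = True
--                             break
--         if valid:
--             res += 1
--     return res
-- ===== SOURCE B (Python) =====
-- def part2(ips):
--     res = 0
--     for ip in ips:
--         abas = set()
--         babs = set()
--         for (b, syms) in ip:
--             for i in range(len(syms) - 2):
--                 a, x, c = syms[i], syms[i + 1], syms[i + 2]
--                 if a == c and a != x:
--                     if b == "":
--                         abas.add(a + x + c)
--                     elif b == "b":
--                         babs.add(x + a + x)
--         if abas & babs:
--             res += 1
--     return res
-- ===== Notes on version B (the rewrite author's own statement) =====
-- stated objective: simpler
-- what changed: B drops the sort and the interleaved collect-and-early-break probe: one pass per ip builds a set of supernet ABA triples and a set of hypernet BAB complements, then tests the set intersection.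
import Mathlib
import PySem

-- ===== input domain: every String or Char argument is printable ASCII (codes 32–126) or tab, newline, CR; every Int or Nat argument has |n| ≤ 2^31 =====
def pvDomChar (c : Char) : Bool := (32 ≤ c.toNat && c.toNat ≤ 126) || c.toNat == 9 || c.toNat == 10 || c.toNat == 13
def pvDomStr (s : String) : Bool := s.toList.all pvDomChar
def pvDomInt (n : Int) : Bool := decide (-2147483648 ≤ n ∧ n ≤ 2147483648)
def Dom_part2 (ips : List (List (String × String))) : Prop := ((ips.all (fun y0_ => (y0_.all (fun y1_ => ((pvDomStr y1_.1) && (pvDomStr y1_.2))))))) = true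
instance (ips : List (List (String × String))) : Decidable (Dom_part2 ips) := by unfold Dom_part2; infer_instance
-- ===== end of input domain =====

-- B drops A's sort and early-break probe: it builds a set of supernet ABA triples and a set of
-- hypernet BAB complements in one pass and tests their intersection (objective: simpler).

-- ===== PORT A =====
-- A's inner loop 'for i in range(len(syms) - 2)' with its early 'break'; state = (valid, patterns).
-- t = syms[i:i+3] has exactly 3 chars for every i the range produces, so the pyGetD default is never read;
-- the f-string comparison f"{t[0]}{t[1]}" == f"{t[2]}{t[1]}" is ported as equality of the two char pairs.
def part2Inner (b : String) (syms : List Char) :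
    List Int → Bool × List (List Char) → Bool × List (List Char)
  | [], st => st
  | i :: is, (valid, patterns) =>
    let t := PySem.List.slice syms (some i) (some (i + 3))
    if PySem.List.pyGetD t 0 ' ' ≠ PySem.List.pyGetD t 1 ' ' ∧
        [PySem.List.pyGetD t 0 ' ', PySem.List.pyGetD t 1 ' '] = [PySem.List.pyGetD t 2 ' ', PySem.List.pyGetD t 1 ' '] then
      if b = "" then part2Inner b syms is (valid, patterns ++ [t])
      else if b = "b" then
        if [PySem.List.pyGetD t 1 ' ', PySem.List.pyGetD t 0 ' ', PySem.List.pyGetD t 1 ' '] ∈ patterns then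
          (true, patterns)   -- valid = True; break
        else part2Inner b syms is (valid, patterns)
      else part2Inner b syms is (valid, patterns)
    else part2Inner b syms is (valid, patterns)

def part2 (ips : List (List (String × String))) : Int :=
  ips.foldl (fun res ip =>
    let ip' := PySem.List.sorted ip (fun p => p.1) false   -- sorted(ip, key=itemgetter(0))
    let st := ip'.foldl (fun st p =>
        part2Inner p.1 p.2.toList
          (PySem.List.pyRange 0 (PySem.Str.len p.2 - 2) 1) st)
      (false, ([] : List (List Char)))
    if st.1 then res + 1 else res) 0

-- ===== PORT B =====
def part2_alt (ips : List (List (String × String))) : Int :=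
  ips.foldl (fun res ip =>
    let sets := ip.foldl (fun (sets : PySem.Set (List Char) × PySem.Set (List Char)) p =>
        (PySem.List.pyRange 0 (PySem.Str.len p.2 - 2) 1).foldl (fun sets i =>
          let a := PySem.List.pyGetD p.2.toList i ' '
          let x := PySem.List.pyGetD p.2.toList (i + 1) ' '
          let c := PySem.List.pyGetD p.2.toList (i + 2) ' '
          if a = c ∧ a ≠ x then
            if p.1 = "" then (PySem.Set.add sets.1 [a, x, c], sets.2)
            else if p.1 = "b" then (sets.1, PySem.Set.add sets.2 [x, a, x])
            else sets
          else sets) sets)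
      (PySem.Set.empty, PySem.Set.empty)
    if PySem.Set.inter sets.1 sets.2 ≠ [] then res + 1 else res) 0

-- ===== PRECONDITION & SPEC =====
def Spec_part2 (ips : List (List (String × String))) (out : Int) : Prop := out = part2_alt ips
instance (ips : List (List (String × String))) (out : Int) : Decidable (Spec_part2 ips out) := by unfold Spec_part2; infer_instance

-- ===== CLAIM (what is proved, stated in full; the proofs are below) =====
def Claim_equal_part2 : Prop := ∀ (ips : List (List (String × String))), Dom_part2 ips → Spec_part2 ips (part2 ips)

-- ===== LEMMAS AND PROOFS =====

-- Spec-side vocabulary (proof-only; the ports never use it).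
def condB (s : List Char) (i : Int) : Bool :=
  decide (PySem.List.pyGetD s i ' ' = PySem.List.pyGetD s (i + 2) ' ' ∧
          PySem.List.pyGetD s i ' ' ≠ PySem.List.pyGetD s (i + 1) ' ')

def triAba (s : List Char) (i : Int) : List Char :=
  [PySem.List.pyGetD s i ' ', PySem.List.pyGetD s (i + 1) ' ', PySem.List.pyGetD s (i + 2) ' ']

def triBab (s : List Char) (i : Int) : List Char :=
  [PySem.List.pyGetD s (i + 1) ' ', PySem.List.pyGetD s i ' ', PySem.List.pyGetD s (i + 1) ' ']

def idxsOf (s : String) : List Int := PySem.List.pyRange 0 (PySem.Str.len s - 2) 1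

def colOf (s : String) : List (List Char) :=
  (idxsOf s).filterMap (fun i => if condB s.toList i then some (triAba s.toList i) else none)

def babOf (s : String) : List (List Char) :=
  (idxsOf s).filterMap (fun i => if condB s.toList i then some (triBab s.toList i) else none)

def hitOf (P : List (List Char)) (s : String) : Bool :=
  (idxsOf s).any (fun i => condB s.toList i && decide (triBab s.toList i ∈ P))

def supL : List (String × String) → List (List Char)
  | [] => []
  | p :: tl => (if p.1 = "" then colOf p.2 else []) ++ supL tl

def babL : List (String × String) → List (List Char)
  | [] => []
  | p :: tl => (if p.1 = "b" then babOf p.2 else []) ++ babL tl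

def hitL (P : List (List Char)) : List (String × String) → Bool
  | [] => false
  | p :: tl =>
    if p.1 = "" then hitL (P ++ colOf p.2) tl
    else if p.1 = "b" then hitOf P p.2 || hitL P tl
    else hitL P tl

lemma getD3_0 (a x c : Char) : PySem.List.pyGetD [a, x, c] 0 ' ' = a := by simp [pysem]
lemma getD3_1 (a x c : Char) : PySem.List.pyGetD [a, x, c] 1 ' ' = x := by simp [pysem]
lemma getD3_2 (a x c : Char) : PySem.List.pyGetD [a, x, c] 2 ' ' = c := by simp [pysem]

-- syms[i:i+3] is exactly the three characters at i, i+1, i+2 when they exist.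
lemma slice3 (s : List Char) (i : Int) (h0 : 0 ≤ i) (h : i + 3 ≤ (s.length : Int)) :
    PySem.List.slice s (some i) (some (i + 3)) =
      [PySem.List.pyGetD s i ' ', PySem.List.pyGetD s (i + 1) ' ',
       PySem.List.pyGetD s (i + 2) ' '] := by
  obtain ⟨k, rfl⟩ : ∃ k : Nat, i = (k : Int) := ⟨i.toNat, (Int.toNat_of_nonneg h0).symm⟩
  have hk : k + 3 ≤ s.length := by exact_mod_cast h
  have h1 : ((k : Int) + 1) = ((k + 1 : Nat) : Int) := by push_cast; ring
  have h2 : ((k : Int) + 2) = ((k + 2 : Nat) : Int) := by push_cast; ring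
  have h3 : ((k : Int) + 3) = ((k + 3 : Nat) : Int) := by push_cast; ring
  rw [h1, h2, h3, PySem.List.slice_natCast]
  simp only [PySem.List.pyGetD_natCast]
  have e : k + 3 - k = 3 := by omega
  rw [e, List.getD_eq_getElem s ' ' (by omega : k < s.length),
      List.getD_eq_getElem s ' ' (by omega : k + 1 < s.length),
      List.getD_eq_getElem s ' ' (by omega : k + 2 < s.length)]
  apply List.ext_getElem
  · simp; omega
  · intro n h1 h2
    simp only [List.length_take, List.length_drop] at h1
    have hn : n < 3 := by omega
    rw [List.getElem_take, List.getElem_drop]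
    interval_cases n <;> simp

-- One step of A's inner loop, phrased with the spec vocabulary.
lemma part2Inner_cons (b : String) (s : List Char) (i : Int) (L : List Int)
    (v : Bool) (P : List (List Char)) (h0 : 0 ≤ i) (h3 : i + 3 ≤ (s.length : Int)) :
    part2Inner b s (i :: L) (v, P) =
      if condB s i then
        (if b = "" then part2Inner b s L (v, P ++ [triAba s i])
         else if b = "b" then
           (if triBab s i ∈ P then (true, P) else part2Inner b s L (v, P))
         else part2Inner b s L (v, P))
      else part2Inner b s L (v, P) := by
  simp only [part2Inner, slice3 s i h0 h3, getD3_0, getD3_1, getD3_2, List.cons.injEq, and_true,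
    triAba, triBab, condB, decide_eq_true_eq]
  by_cases hax : PySem.List.pyGetD s i ' ' = PySem.List.pyGetD s (i + 1) ' ' <;>
  by_cases hac : PySem.List.pyGetD s i ' ' = PySem.List.pyGetD s (i + 2) ' ' <;>
    simp [hax, hac]

-- A's inner loop characterised on any index list whose indices keep the slice 3 long.
lemma innerA_spec (b : String) (s : List Char) :
    ∀ (L : List Int), (∀ i ∈ L, 0 ≤ i ∧ i + 3 ≤ (s.length : Int)) →
      ∀ (v : Bool) (P : List (List Char)),
    part2Inner b s L (v, P) =
      if b = "" then
        (v, P ++ L.filterMap (fun i => if condB s i then some (triAba s i) else none))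
      else if b = "b" then
        (v || L.any (fun i => condB s i && decide (triBab s i ∈ P)), P)
      else (v, P) := by
  intro L
  induction L with
  | nil => intro _ v P; simp [part2Inner]
  | cons i L ih =>
    intro hL v P
    obtain ⟨h0, h3⟩ := hL i (List.mem_cons_self)
    have hL' : ∀ j ∈ L, 0 ≤ j ∧ j + 3 ≤ (s.length : Int) := fun j hj => hL j (by simp [hj])
    rw [part2Inner_cons b s i L v P h0 h3]
    by_cases hc : condB s i
    · by_cases hb0 : b = ""
      · rw [if_pos hc, if_pos hb0, ih hL', if_pos hb0]
        simp [hb0, hc]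
      · by_cases hb1 : b = "b"
        · rw [if_pos hc, if_neg hb0, if_pos hb1]
          by_cases hm : triBab s i ∈ P
          · simp [hb1, hc, hm]
          · rw [ih hL']
            simp [hb1, hc, hm]
        · rw [if_pos hc, if_neg hb0, if_neg hb1, ih hL']
          simp [hb0, hb1]
    · rw [if_neg hc, ih hL']
      by_cases hb0 : b = "" <;> by_cases hb1 : b = "b" <;>
        simp [hb0, hb1, hc]

lemma idxsOf_bounds (t : String) : ∀ i ∈ idxsOf t, 0 ≤ i ∧ i + 3 ≤ (t.toList.length : Int) := by
  intro i hi
  rw [idxsOf, PySem.List.mem_pyRange_one] at hi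
  have := PySem.Str.len_eq t
  omega

-- A's fold over the (sorted) segment list.
lemma foldA_spec :
    ∀ (l : List (String × String)) (v : Bool) (P : List (List Char)),
    l.foldl (fun st p =>
        part2Inner p.1 p.2.toList (PySem.List.pyRange 0 (PySem.Str.len p.2 - 2) 1) st) (v, P) =
      (v || hitL P l, P ++ supL l)
  | [], v, P => by simp [hitL, supL]
  | p :: tl, v, P => by
    rw [List.foldl_cons]
    have hidx : PySem.List.pyRange 0 (PySem.Str.len p.2 - 2) 1 = idxsOf p.2 := rfl
    rw [hidx, innerA_spec p.1 p.2.toList (idxsOf p.2) (idxsOf_bounds p.2) v P]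
    by_cases hb0 : p.1 = ""
    · rw [if_pos hb0, foldA_spec tl]
      simp [hitL, supL, hb0, colOf, List.append_assoc]
    · by_cases hb1 : p.1 = "b"
      · rw [if_neg hb0, if_pos hb1, foldA_spec tl]
        simp [hitL, supL, hb1, hitOf, Bool.or_assoc]
      · rw [if_neg hb0, if_neg hb1, foldA_spec tl]
        simp [hitL, supL, hb0, hb1]

lemma supL_nil_of_no_empty : ∀ (l : List (String × String)), (∀ p ∈ l, p.1 ≠ "") → supL l = []
  | [], _ => rfl
  | p :: tl, h => by
    rw [supL, if_neg (h p (List.mem_cons_self)), supL_nil_of_no_empty tl (fun q hq => h q (by simp [hq]))]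
    rfl

-- On a key-sorted segment list, A's interleaved probe sees the FULL supernet pattern list.
lemma hitL_eq : ∀ (l : List (String × String)), l.Pairwise (fun a b => a.1 ≤ b.1) →
    ∀ (P : List (List Char)),
    hitL P l = l.any (fun p => decide (p.1 = "b") && hitOf (P ++ supL l) p.2)
  | [], _, P => by simp [hitL]
  | p :: tl, hp, P => by
    rw [List.pairwise_cons] at hp
    obtain ⟨hhead, htail⟩ := hp
    by_cases hb0 : p.1 = ""
    · rw [hitL, if_pos hb0, hitL_eq tl htail (P ++ colOf p.2)]
      simp [supL, hb0, List.append_assoc]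
    · by_cases hb1 : p.1 = "b"
      · have hsup : supL tl = [] := by
          apply supL_nil_of_no_empty
          intro q hq hq0
          have : p.1 ≤ q.1 := hhead q hq
          rw [hb1, hq0, String.le_iff_toList_le] at this
          exact absurd this (by decide)
        rw [hitL, if_neg hb0, if_pos hb1, hitL_eq tl htail P]
        simp [supL, hsup, hb1]
      · rw [hitL, if_neg hb0, if_neg hb1, hitL_eq tl htail P]
        simp [supL, hb0, hb1]

-- B's inner loop over one segment's index range.
lemma innerB_spec (b t : String) :
    ∀ (L : List Int) (S T : PySem.Set (List Char)),
    L.foldl (fun sets i =>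
        if PySem.List.pyGetD t.toList i ' ' = PySem.List.pyGetD t.toList (i + 2) ' ' ∧
            PySem.List.pyGetD t.toList i ' ' ≠ PySem.List.pyGetD t.toList (i + 1) ' ' then
          if b = "" then
            (PySem.Set.add sets.1 [PySem.List.pyGetD t.toList i ' ',
              PySem.List.pyGetD t.toList (i + 1) ' ', PySem.List.pyGetD t.toList (i + 2) ' '], sets.2)
          else if b = "b" then
            (sets.1, PySem.Set.add sets.2 [PySem.List.pyGetD t.toList (i + 1) ' ',
              PySem.List.pyGetD t.toList i ' ', PySem.List.pyGetD t.toList (i + 1) ' '])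
          else sets
        else sets) (S, T) =
      if b = "" then
        (PySem.Set.update S (L.filterMap
          (fun i => if condB t.toList i then some (triAba t.toList i) else none)), T)
      else if b = "b" then
        (S, PySem.Set.update T (L.filterMap
          (fun i => if condB t.toList i then some (triBab t.toList i) else none)))
      else (S, T)
  | [], S, T => by
    by_cases hb0 : b = "" <;> by_cases hb1 : b = "b" <;>
      simp [hb0, hb1, PySem.Set.update]
  | i :: L, S, T => by
    rw [List.foldl_cons]
    by_cases hc : condB t.toList i
    · rw [condB, decide_eq_true_eq] at hc
      rw [if_pos hc]
      have hcb : condB t.toList i = true := by rw [condB, decide_eq_true_eq]; exact hc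
      by_cases hb0 : b = ""
      · subst hb0
        rw [if_pos rfl, innerB_spec "" t L _ T]
        simp [hcb, PySem.Set.update, triAba]
      · by_cases hb1 : b = "b"
        · subst hb1
          rw [if_neg (by decide : ¬("b" : String) = ""), if_pos rfl, innerB_spec "b" t L S _]
          simp [hcb, PySem.Set.update, triBab]
        · rw [if_neg hb0, if_neg hb1, innerB_spec b t L S T]
          simp [hb0, hb1]
    · rw [if_neg (by rw [condB, decide_eq_true_eq] at hc; exact hc), innerB_spec b t L S T]
      by_cases hb0 : b = "" <;> by_cases hb1 : b = "b" <;>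
        simp [hb0, hb1, Bool.eq_false_iff.mpr hc]

lemma update_append (S : PySem.Set (List Char)) (xs ys : List (List Char)) :
    PySem.Set.update S (xs ++ ys) = PySem.Set.update (PySem.Set.update S xs) ys := by
  simp [PySem.Set.update, List.foldl_append]

-- B's fold over the segment list builds exactly the two pattern sets.
lemma foldB_spec :
    ∀ (l : List (String × String)) (S T : PySem.Set (List Char)),
    l.foldl (fun (sets : PySem.Set (List Char) × PySem.Set (List Char)) p =>
        (PySem.List.pyRange 0 (PySem.Str.len p.2 - 2) 1).foldl (fun sets i =>
          if PySem.List.pyGetD p.2.toList i ' ' = PySem.List.pyGetD p.2.toList (i + 2) ' ' ∧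
              PySem.List.pyGetD p.2.toList i ' ' ≠ PySem.List.pyGetD p.2.toList (i + 1) ' ' then
            if p.1 = "" then
              (PySem.Set.add sets.1 [PySem.List.pyGetD p.2.toList i ' ',
                PySem.List.pyGetD p.2.toList (i + 1) ' ', PySem.List.pyGetD p.2.toList (i + 2) ' '], sets.2)
            else if p.1 = "b" then
              (sets.1, PySem.Set.add sets.2 [PySem.List.pyGetD p.2.toList (i + 1) ' ',
                PySem.List.pyGetD p.2.toList i ' ', PySem.List.pyGetD p.2.toList (i + 1) ' '])
            else sets
          else sets) sets) (S, T) =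
      (PySem.Set.update S (supL l), PySem.Set.update T (babL l))
  | [], S, T => by simp [supL, babL, PySem.Set.update]
  | p :: tl, S, T => by
    rw [List.foldl_cons]
    have h := innerB_spec p.1 p.2 (PySem.List.pyRange 0 (PySem.Str.len p.2 - 2) 1) S T
    by_cases hb0 : p.1 = ""
    · rw [h, if_pos hb0, foldB_spec tl]
      simp [supL, babL, hb0, update_append, colOf, idxsOf]
    · by_cases hb1 : p.1 = "b"
      · rw [h, if_neg hb0, if_pos hb1, foldB_spec tl]
        simp [supL, babL, hb1, update_append, babOf, idxsOf]
      · rw [h, if_neg hb0, if_neg hb1, foldB_spec tl]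
        simp [supL, babL, hb0, hb1]

lemma mem_supL : ∀ (l : List (String × String)) (y : List Char),
    y ∈ supL l ↔ ∃ p ∈ l, p.1 = "" ∧ y ∈ colOf p.2
  | [], y => by simp [supL]
  | p :: tl, y => by
    rw [supL, List.mem_append, mem_supL tl y]
    by_cases hb0 : p.1 = "" <;> simp [hb0]

lemma mem_babL : ∀ (l : List (String × String)) (y : List Char),
    y ∈ babL l ↔ ∃ p ∈ l, p.1 = "b" ∧ y ∈ babOf p.2
  | [], y => by simp [babL]
  | p :: tl, y => by
    rw [babL, List.mem_append, mem_babL tl y]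
    by_cases hb1 : p.1 = "b" <;> simp [hb1]

lemma hitOf_iff (P : List (List Char)) (t : String) :
    hitOf P t = true ↔ ∃ y ∈ babOf t, y ∈ P := by
  rw [hitOf, List.any_eq_true]
  constructor
  · rintro ⟨i, hi, hcond⟩
    rw [Bool.and_eq_true, decide_eq_true_eq] at hcond
    exact ⟨triBab t.toList i, by rw [babOf, List.mem_filterMap]; exact ⟨i, hi, by rw [if_pos hcond.1]⟩, hcond.2⟩
  · rintro ⟨y, hy, hyP⟩
    rw [babOf, List.mem_filterMap] at hy
    obtain ⟨i, hi, hsome⟩ := hy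
    by_cases hc : condB t.toList i
    · rw [if_pos hc, Option.some.injEq] at hsome
      exact ⟨i, hi, by rw [Bool.and_eq_true, decide_eq_true_eq]; exact ⟨hc, hsome ▸ hyP⟩⟩
    · rw [if_neg hc] at hsome; exact absurd hsome (by simp)

-- The per-ip booleans of the two programs agree.
lemma perIp_eq (ip : List (String × String)) :
    (((PySem.List.sorted ip (fun p => p.1) false).foldl (fun st p =>
        part2Inner p.1 p.2.toList (PySem.List.pyRange 0 (PySem.Str.len p.2 - 2) 1) st)
      (false, ([] : List (List Char)))).1 = true) ↔
      (PySem.Set.inter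
        (PySem.Set.update (PySem.Set.empty : PySem.Set (List Char)) (supL ip))
        (PySem.Set.update (PySem.Set.empty : PySem.Set (List Char)) (babL ip)) ≠ []) := by
  have hperm : (PySem.List.sorted ip (fun p => p.1) false).Perm ip :=
    PySem.List.sorted_perm ip (fun p => p.1) false
  rw [foldA_spec, Bool.false_or,
      hitL_eq _ (PySem.List.sorted_pairwise ip (fun p => p.1)) []]
  simp only [List.nil_append]
  constructor
  · intro h
    rw [List.any_eq_true] at h
    obtain ⟨p, hp, hcond⟩ := h
    rw [Bool.and_eq_true, decide_eq_true_eq] at hcond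
    obtain ⟨hb, hhit⟩ := hcond
    rw [hitOf_iff] at hhit
    obtain ⟨y, hy, hyP⟩ := hhit
    apply List.ne_nil_of_mem (a := y)
    rw [PySem.Set.mem_inter]
    constructor
    · rw [PySem.Set.mem_update]
      right
      rw [mem_supL] at hyP ⊢
      obtain ⟨q, hq, hq0, hqy⟩ := hyP
      exact ⟨q, hperm.mem_iff.mp hq, hq0, hqy⟩
    · rw [PySem.Set.mem_update]
      right
      rw [mem_babL]
      exact ⟨p, hperm.mem_iff.mp hp, hb, hy⟩
  · intro h
    obtain ⟨y, hy⟩ := List.exists_mem_of_ne_nil _ h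
    rw [PySem.Set.mem_inter, PySem.Set.mem_update, PySem.Set.mem_update] at hy
    obtain ⟨h1, h2⟩ := hy
    have hsup : y ∈ supL ip := by
      rcases h1 with h1 | h1
      · exact absurd h1 (by simp [PySem.Set.empty])
      · exact h1
    have hbab : y ∈ babL ip := by
      rcases h2 with h2 | h2
      · exact absurd h2 (by simp [PySem.Set.empty])
      · exact h2
    rw [mem_babL] at hbab
    obtain ⟨p, hp, hb, hy2⟩ := hbab
    rw [List.any_eq_true]
    refine ⟨p, hperm.mem_iff.mpr hp, ?_⟩
    rw [Bool.and_eq_true, decide_eq_true_eq]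
    refine ⟨hb, ?_⟩
    rw [hitOf_iff]
    refine ⟨y, hy2, ?_⟩
    rw [mem_supL] at hsup ⊢
    obtain ⟨q, hq, hq0, hqy⟩ := hsup
    exact ⟨q, hperm.mem_iff.mpr hq, hq0, hqy⟩

-- ===== VERDICT (by name: the statement is the Claim_ definition above) =====
theorem part2_spec : Claim_equal_part2 := by
  intro ips _
  show part2 ips = part2_alt ips
  simp only [part2, part2_alt]
  congr 1
  funext res ip
  rw [foldB_spec]
  by_cases h : PySem.Set.inter
      (PySem.Set.update (PySem.Set.empty : PySem.Set (List Char)) (supL ip))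
      (PySem.Set.update (PySem.Set.empty : PySem.Set (List Char)) (babL ip)) ≠ []
  · rw [if_pos ((perIp_eq ip).mpr h), if_pos h]
  · rw [if_neg (fun hc => h ((perIp_eq ip).mp hc)), if_neg h]
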